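-- pv_equiv track=rewrite | github.com/LaneyS05/PY-Sorting-and-Problem-Solving | 4.py | match_nums_with_words
-- ===== SOURCE A (Python) =====
-- def match_nums_with_words(nums, sentence):
--     words = sentence.split()
--
--     words_by_length = {}
--     for word in words:
--         word_length = len(word)
--         if word_length not in words_by_length:
--             words_by_length[word_length] = [word]
--         else:
--             words_by_length[word_length].append(word)
--
--     result_pairs = []
--
--     for num in nums:
--         if num in words_by_length:
--             matching_words = words_by_length[num]
--
--             pairs = [(num, word) for word in matching_words]
--
--             result_pairs.extend(pairs)
--
--     return result_pairs
-- ===== SOURCE B (Python) =====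
-- def match_nums_with_words(nums, sentence):
--     words = sentence.split()
--     result = []
--     for num in nums:
--         for word in words:
--             if len(word) == num:
--                 result.append((num, word))
--     return result
-- ===== Notes on version B (the rewrite author's own statement) =====
-- stated objective: simpler
-- what changed: Drops the precomputed length->words dictionary and its membership lookup; B just splits once and does a direct nested scan appending (num, word) when len(word) == num.
import Mathlib
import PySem

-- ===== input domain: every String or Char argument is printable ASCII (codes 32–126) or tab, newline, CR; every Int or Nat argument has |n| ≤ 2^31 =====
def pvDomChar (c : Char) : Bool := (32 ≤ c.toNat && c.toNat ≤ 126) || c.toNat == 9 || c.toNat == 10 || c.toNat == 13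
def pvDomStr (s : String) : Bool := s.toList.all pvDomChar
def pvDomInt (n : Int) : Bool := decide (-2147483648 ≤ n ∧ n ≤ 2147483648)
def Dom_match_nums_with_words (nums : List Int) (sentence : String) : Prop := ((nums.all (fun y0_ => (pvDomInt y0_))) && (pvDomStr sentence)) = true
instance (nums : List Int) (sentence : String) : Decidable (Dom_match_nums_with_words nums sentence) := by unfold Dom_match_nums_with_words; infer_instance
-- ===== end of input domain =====

-- B replaces A's length->words dictionary with a direct nested scan (outer over nums, inner over words); simpler, same results.


-- ===== PORT A =====
-- the grouping loop: if word_length not in dict -> dict[wl] = [word] else dict[wl].append(word)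
def pvBuildByLength (words : List String) : PySem.Dict Int (List String) :=
  words.foldl
    (fun d w =>
      if d.contains ((PySem.Str.len w : Int)) then
        d.insert ((PySem.Str.len w : Int)) (d.getD ((PySem.Str.len w : Int)) [] ++ [w])
      else
        d.insert ((PySem.Str.len w : Int)) [w])
    PySem.Dict.empty

def match_nums_with_words (nums : List Int) (sentence : String) : List (Int × String) :=
  let words := PySem.Str.split₀ sentence
  let wordsByLength := pvBuildByLength words
  nums.foldl
    (fun resultPairs num =>
      if wordsByLength.contains num then
        resultPairs ++ (wordsByLength.getD num []).map (fun word => (num, word))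
      else
        resultPairs)
    []

-- ===== PORT B =====
def match_nums_with_words_alt (nums : List Int) (sentence : String) : List (Int × String) :=
  let words := PySem.Str.split₀ sentence
  nums.foldl
    (fun result num =>
      words.foldl
        (fun result word =>
          if ((PySem.Str.len word : Int)) == num then result ++ [(num, word)] else result)
        result)
    []

-- ===== PRECONDITION & SPEC =====
def Spec_match_nums_with_words (nums : List Int) (sentence : String) (out : List (Int × String)) : Prop := out = match_nums_with_words_alt nums sentence
instance (nums : List Int) (sentence : String) (out : List (Int × String)) : Decidable (Spec_match_nums_with_words nums sentence out) := by unfold Spec_match_nums_with_words; infer_instance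

-- ===== CLAIM (what is proved, stated in full; the proofs are below) =====
def Claim_equal_match_nums_with_words : Prop := ∀ (nums : List Int) (sentence : String), Dom_match_nums_with_words nums sentence → Spec_match_nums_with_words nums sentence (match_nums_with_words nums sentence)

-- ===== LEMMAS AND PROOFS =====

-- the built dict's value at n is the subsequence of words with length n (generalized over the starting dict)
theorem pvBuild_getD (words : List String) (d : PySem.Dict Int (List String)) (n : Int) :
    (words.foldl
      (fun d w =>
        if d.contains ((PySem.Str.len w : Int)) then
          d.insert ((PySem.Str.len w : Int)) (d.getD ((PySem.Str.len w : Int)) [] ++ [w])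
        else
          d.insert ((PySem.Str.len w : Int)) [w]) d).getD n []
      = d.getD n [] ++ words.filter (fun w => ((PySem.Str.len w : Int)) == n) := by
  induction words generalizing d with
  | nil => simp
  | cons w ws ih =>
    simp only [List.foldl_cons, List.filter_cons]
    by_cases hc : d.contains ((PySem.Str.len w : Int)) = true
    · rw [if_pos hc, ih]
      by_cases hn : ((PySem.Str.len w : Int)) = n
      · subst hn
        simp [PySem.Dict.getD_insert_self]
      · rw [PySem.Dict.getD_insert_of_ne _ _ _ (Ne.symm hn)]
        have hn' : ¬((w.length : Int)) = n := by simpa using hn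
        simp [hn']
    · rw [if_neg hc, ih]
      by_cases hn : ((PySem.Str.len w : Int)) = n
      · subst hn
        rw [PySem.Dict.getD_insert_self,
            PySem.Dict.getD_of_not_contains _ _ (by simpa using hc)]
        simp
      · rw [PySem.Dict.getD_insert_of_ne _ _ _ (Ne.symm hn)]
        have hn' : ¬((w.length : Int)) = n := by simpa using hn
        simp [hn']

-- the built dict contains n iff some word has length n
theorem pvBuild_contains (words : List String) (d : PySem.Dict Int (List String)) (n : Int) :
    (words.foldl
      (fun d w =>
        if d.contains ((PySem.Str.len w : Int)) then
          d.insert ((PySem.Str.len w : Int)) (d.getD ((PySem.Str.len w : Int)) [] ++ [w])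
        else
          d.insert ((PySem.Str.len w : Int)) [w]) d).contains n
      = (d.contains n || words.any (fun w => ((PySem.Str.len w : Int)) == n)) := by
  induction words generalizing d with
  | nil => simp
  | cons w ws ih =>
    simp only [List.foldl_cons, List.any_cons]
    by_cases hc : d.contains ((PySem.Str.len w : Int)) = true
    · rw [if_pos hc, ih, PySem.Dict.contains_insert]
      by_cases hn : n = ((w.length : Int))
      · simp [hn, Bool.or_left_comm]
      · have h1 : (n == ((w.length : Int))) = false := by simpa using hn
        have h2 : (((w.length : Int)) == n) = false := by simpa using (Ne.symm hn)
        simp [h1, h2]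
    · rw [if_neg hc, ih, PySem.Dict.contains_insert]
      by_cases hn : n = ((w.length : Int))
      · simp [hn, Bool.or_left_comm]
      · have h1 : (n == ((w.length : Int))) = false := by simpa using hn
        have h2 : (((w.length : Int)) == n) = false := by simpa using (Ne.symm hn)
        simp [h1, h2]

theorem match_nums_with_words_eq (nums : List Int) (sentence : String) :
    match_nums_with_words nums sentence = match_nums_with_words_alt nums sentence := by
  unfold match_nums_with_words match_nums_with_words_alt
  apply PySem.List.foldl_congr_mem
  intro acc num _
  rw [PySem.List.foldl_append_if, pvBuildByLength, pvBuild_getD, pvBuild_contains]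
  simp only [PySem.Dict.getD_empty, PySem.Dict.contains_empty, List.nil_append, Bool.false_or]
  by_cases h : (PySem.Str.split₀ sentence).any (fun w => ((PySem.Str.len w : Int)) == num) = true
  · rw [if_pos h]
  · rw [if_neg h]
    have hfil : (PySem.Str.split₀ sentence).filter (fun w => ((PySem.Str.len w : Int)) == num) = [] := by
      simp only [List.any_eq_true, not_exists, not_and] at h
      simp only [List.filter_eq_nil_iff]
      intro a ha
      simpa using h a ha
    rw [hfil]
    simp

-- ===== VERDICT (by name: the statement is the Claim_ definition above) =====
theorem match_nums_with_words_spec : Claim_equal_match_nums_with_words := by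
  intro nums sentence _
  exact match_nums_with_words_eq nums sentence
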